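-- pv_equiv track=rewrite | github.com/zacharyaanglin/python-practice | python-practice/project-euler/problem_twentysix/main.py | _repeating_sequence
-- ===== SOURCE A (Python) =====
-- import itertools
--
-- PRECISION: int = 5_000
--
-- def _repeating_sequence(string: str):
--     """Return the longest repeating sequence in a string."""
--     for j in range(0, len(string)):
--         substring = string[j:]
--         for i in range(int(PRECISION / 2), 1, -1):
--             if (
--                 substring[:i] * 2 == substring[: 2 * i]
--                 and substring[: int(i / 2)] * 2 != substring[:i]
--             ):
--                 return substring[:i]
--
--     if len(substring) > 1:
--         return one_term_repeating_sequence(substring)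
--
--     if len(string) > 1 and string[-2] == substring:
--         return one_term_repeating_sequence(string)
--     return string
--
-- def one_term_repeating_sequence(string: str):
--     """Find a one-term repeating sequence."""
--     if string == "".join(itertools.repeat(string[-1], len(string))):
--         return string[-1]
--
--     return string
-- ===== SOURCE B (Python) =====
-- import itertools
--
-- PRECISION: int = 5_000
--
--
-- def _z_array_upto(t, hi):
--     """Z-values z[i] = len of the longest common prefix of t and t[i:], for 1 <= i < hi.
--
--     The standard window (l, r) recurrence only ever reads entries below the
--     current index, so stopping the loop at hi yields exactly the same values
--     for all indices below hi."""
--     m = len(t)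
--     z = [0] * m
--     l = r = 0
--     for i in range(1, min(m, hi)):
--         if i < r:
--             z[i] = min(r - i, z[i - l])
--         while i + z[i] < m and t[z[i]] == t[i + z[i]]:
--             z[i] += 1
--         if i + z[i] > r:
--             l, r = i, i + z[i]
--     return z
--
--
-- def _repeating_sequence(string: str):
--     """Return the longest repeating sequence in a string."""
--     n = len(string)
--     cap = PRECISION // 2
--     for j in range(n):
--         t = string[j:]
--         m = n - j
--         top = min(cap, m // 2)
--         z = _z_array_upto(t, top + 1)
--         for i in range(top, 1, -1):
--             if z[i] >= i and not (i % 2 == 0 and z[i // 2] >= i // 2):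
--                 return t[:i]
--     if n > 1 and string[-2] == string[-1]:
--         if string == string[-1] * n:
--             return string[-1]
--         return string
--     return string
-- ===== Notes on version B (the rewrite author's own statement) =====
-- stated objective: alternative
-- what changed: B replaces A's per-suffix scan of 2500 slice-doubling comparisons (substring[:i]*2 == substring[:2*i]) by computing the Z-array of the suffix (longest common prefix with each of its shifts, capped at the scanned indices) with the classic (l,r)-window recurrence and reading the square/half-square conditions off as z[i] >= i and z[i//2] >= i//2, scanning i only down from min(2500, m//2).
import Mathlib
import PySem

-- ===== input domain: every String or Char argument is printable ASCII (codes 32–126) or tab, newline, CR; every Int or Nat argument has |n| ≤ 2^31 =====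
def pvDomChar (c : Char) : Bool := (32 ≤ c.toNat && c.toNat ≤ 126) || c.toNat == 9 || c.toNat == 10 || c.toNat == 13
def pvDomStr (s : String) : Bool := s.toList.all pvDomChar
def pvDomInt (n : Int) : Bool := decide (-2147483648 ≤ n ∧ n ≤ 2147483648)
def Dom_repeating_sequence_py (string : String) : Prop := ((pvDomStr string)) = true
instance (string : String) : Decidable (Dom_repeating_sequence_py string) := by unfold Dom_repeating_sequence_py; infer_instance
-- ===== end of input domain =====

-- B replaces A's per-suffix scan of 2500 slice-doubling comparisons by a Z-array (longest
-- common prefix of the suffix with its own shifts, computed by the (l,r)-window recurrence,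
-- capped at the scanned indices) and reads the square / half-square tests off it.

-- ===== PORT A =====

-- one_term_repeating_sequence: '"".join(itertools.repeat(string[-1], len(string)))' is
-- List.replicate (len) (last char); string[-1] is pyGet? s (-1) (none = IndexError; both
-- call sites guarantee a nonempty argument, the none branch is unreachable there).
def pvOneTerm (s : List Char) : List Char :=
  match PySem.List.pyGet? s (-1) with
  | some c => if s = List.replicate s.length c then [c] else s
  | none => s

-- the inner 'if' condition: 'substring[:i] * 2 == substring[:2*i] and
-- substring[:int(i/2)] * 2 != substring[:i]'; str * 2 is append with itself,
-- int(i/2) is truncating division PySem.Int.truncdiv (exact: |i| ≤ 2500 < 2^53).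
def pvACond (sub : List Char) (i : Int) : Bool :=
  decide (PySem.List.slice sub none (some i) ++ PySem.List.slice sub none (some i)
          = PySem.List.slice sub none (some (2 * i)))
  && !decide (PySem.List.slice sub none (some (PySem.Int.truncdiv i 2))
              ++ PySem.List.slice sub none (some (PySem.Int.truncdiv i 2))
              = PySem.List.slice sub none (some i))

-- 'for i in range(int(PRECISION / 2), 1, -1): if …: return substring[:i]' (int(5000/2) = 2500)
def pvAInner (sub : List Char) : List Int → Option (List Char)
  | [] => none
  | i :: rest =>
    if pvACond sub i then some (PySem.List.slice sub none (some i)) else pvAInner sub rest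

-- 'for j in range(0, len(string)): substring = string[j:]; for i in …: return …'
def pvAOuter (s : List Char) : List Int → Option (List Char)
  | [] => none
  | j :: rest =>
    match pvAInner (PySem.List.slice s (some j) none) (PySem.List.pyRange 2500 1 (-1)) with
    | some r => some r
    | none => pvAOuter s rest

def repeating_sequence_py (string : String) : String :=
  let s := string.toList
  match pvAOuter s (PySem.List.pyRange 0 s.length 1) with
  | some r => String.ofList r
  | none =>
    -- after the loop the variable 'substring' holds string[len-1:]
    -- (on "" Python raises UnboundLocalError — excluded by Pre_; here the slice is just []).
    let sub := PySem.List.slice s (some ((s.length : Int) - 1)) none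
    if 1 < sub.length then String.ofList (pvOneTerm sub)
    else if decide (1 < s.length)
            && decide ((PySem.List.pyGet? s (-2)).map (fun c => [c]) = some sub) then
      String.ofList (pvOneTerm s)
    else string

-- ===== PORT B =====

-- the z-extension 'while i + z[i] < m and t[z[i]] == t[i + z[i]]: z[i] += 1'
def pvZExtend (t : List Char) (i : Nat) (k : Nat) : Nat :=
  if h : i + k < t.length ∧ t[k]? = t[i + k]? then pvZExtend t i (k + 1) else k
termination_by t.length - k
decreasing_by omega

-- the loop of _z_array over i in range(1, m) with state (z, l, r); i is nonnegative,
-- list indices are in range, so Python's z[·] reads are List.getD (default never hit).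
def pvZLoop (t : List Char) (z : List Nat) (l r : Nat) : List Int → List Nat
  | [] => z
  | i :: rest =>
    let i' := i.toNat
    let z1 := if i' < r then z.set i' (min (r - i') (z.getD (i' - l) 0)) else z
    let v := pvZExtend t i' (z1.getD i' 0)
    let z2 := z1.set i' v
    if r < i' + v then pvZLoop t z2 i' (i' + v) rest else pvZLoop t z2 l r rest

-- _z_array_upto: z = [0]*m; l = r = 0; for i in range(1, min(m, hi)): …
def pvZArray (t : List Char) (hi : Nat) : List Nat :=
  pvZLoop t (List.replicate t.length 0) 0 0 (PySem.List.pyRange 1 (min t.length hi : Nat) 1)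

-- 'z[i] >= i and not (i % 2 == 0 and z[i // 2] >= i // 2)'
def pvBCond (z : List Nat) (i : Nat) : Bool :=
  decide (i ≤ z.getD i 0) && !(decide (i % 2 = 0) && decide (i / 2 ≤ z.getD (i / 2) 0))

-- 'for i in range(min(cap, m // 2), 1, -1): if …: return t[:i]'
def pvBInner (t : List Char) (z : List Nat) : List Int → Option (List Char)
  | [] => none
  | i :: rest =>
    if pvBCond z i.toNat then some (t.take i.toNat) else pvBInner t z rest

-- 'for j in range(n): t = string[j:]; m = n - j; top = min(cap, m // 2); z = …; for i in …'
def pvBOuter (s : List Char) : List Int → Option (List Char)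
  | [] => none
  | j :: rest =>
    let t := s.drop j.toNat
    let m := s.length - j.toNat
    let top := min 2500 (m / 2)
    match pvBInner t (pvZArray t (top + 1)) (PySem.List.pyRange (top : Int) 1 (-1)) with
    | some r => some r
    | none => pvBOuter s rest

def repeating_sequence_py_alt (string : String) : String :=
  let s := string.toList
  let n := s.length
  match pvBOuter s (PySem.List.pyRange 0 n 1) with
  | some r => String.ofList r
  | none =>
    -- 'if n > 1 and string[-2] == string[-1]: …'
    if decide (1 < n) && decide (PySem.List.pyGet? s (-2) = PySem.List.pyGet? s (-1)) then
      match PySem.List.pyGet? s (-1) with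
      | some c => if s = List.replicate n c then String.ofList [c] else string
      | none => string   -- unreachable: 1 < n
    else string

-- ===== PRECONDITION & SPEC =====

-- Pre_ excludes only the empty string, on which A raises UnboundLocalError
-- ('substring' is referenced after a loop whose body never ran).
def Pre_repeating_sequence_py (string : String) : Prop := string ≠ ""
instance (string : String) : Decidable (Pre_repeating_sequence_py string) := by
  unfold Pre_repeating_sequence_py; infer_instance

def pvWitness_repeating_sequence_py : String := "abab"

def Spec_repeating_sequence_py (string : String) (out : String) : Prop :=
  out = repeating_sequence_py_alt string
instance (string : String) (out : String) : Decidable (Spec_repeating_sequence_py string out) := by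
  unfold Spec_repeating_sequence_py; infer_instance

-- ===== CLAIM (what is proved, stated in full; the proofs are below) =====
def Claim_equal_repeating_sequence_py : Prop := ∀ (string : String), Dom_repeating_sequence_py string → Pre_repeating_sequence_py string → Spec_repeating_sequence_py string (repeating_sequence_py string)

-- ===== LEMMAS AND PROOFS =====

-- longest common prefix of two lists (proof-side reference for the Z-array)
def pvLcp : List Char → List Char → Nat
  | a :: as, b :: bs => if a = b then pvLcp as bs + 1 else 0
  | _, _ => 0

-- pvL t q = z-value semantics: lcp of t with its shift by q
def pvL (t : List Char) (q : Nat) : Nat := pvLcp t (t.drop q)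

theorem pvLcp_le_right (a b : List Char) : pvLcp a b ≤ b.length := by
  induction a generalizing b with
  | nil => simp [pvLcp]
  | cons x as ih =>
    cases b with
    | nil => simp [pvLcp]
    | cons y bs =>
      simp only [pvLcp, List.length_cons]
      split
      · exact Nat.succ_le_succ (ih bs)
      · omega

theorem pvLcp_getElem? (a b : List Char) (k : Nat) (h : k < pvLcp a b) : a[k]? = b[k]? := by
  induction a generalizing b k with
  | nil => simp [pvLcp] at h
  | cons x as ih =>
    cases b with
    | nil => simp [pvLcp] at h
    | cons y bs =>
      simp only [pvLcp] at h
      by_cases hxy : x = y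
      · simp only [hxy, if_true] at h
        cases k with
        | zero => simp [hxy]
        | succ k => simpa using ih bs k (by omega)
      · simp [hxy] at h

theorem pvLcp_max (a b : List Char) (ha : pvLcp a b < a.length) (hb : pvLcp a b < b.length) :
    a[pvLcp a b]? ≠ b[pvLcp a b]? := by
  induction a generalizing b with
  | nil => simp at ha
  | cons x as ih =>
    cases b with
    | nil => simp at hb
    | cons y bs =>
      by_cases hxy : x = y
      · simp only [pvLcp, hxy, if_true] at ha hb ⊢
        simpa using ih bs (by simpa using ha) (by simpa using hb)
      · simp [pvLcp, hxy]

theorem pvLe_pvLcp (a b : List Char) (s : Nat) (hs1 : s ≤ a.length) (hs2 : s ≤ b.length)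
    (h : ∀ k, k < s → a[k]? = b[k]?) : s ≤ pvLcp a b := by
  by_contra hc
  rcases Nat.lt_or_ge (pvLcp a b) s with hlt | hge
  · exact pvLcp_max a b (by omega) (by omega) (h (pvLcp a b) hlt)
  · omega

theorem pvLcp_take (a b : List Char) (i : Nat) (h : i ≤ pvLcp a b) : a.take i = b.take i := by
  apply List.ext_getElem?
  intro k
  rw [List.getElem?_take, List.getElem?_take]
  by_cases hk : k < i
  · simp only [hk, if_true]
    exact pvLcp_getElem? a b k (by omega)
  · simp [hk]


-- i ≤ pvL t i ↔ the doubled prefix equality (for 1 ≤ i)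
theorem pvSq_iff (t : List Char) (i : Nat) (h1 : 1 ≤ i) (hlen : 1 ≤ t.length) :
    (t.take i ++ t.take i = t.take (2 * i)) ↔ i ≤ pvL t i := by
  have hadd : t.take (2 * i) = t.take i ++ (t.drop i).take i := by
    rw [Nat.two_mul, List.take_add]
  constructor
  · intro heq
    rw [hadd] at heq
    have heq2 : t.take i = (t.drop i).take i := List.append_cancel_left heq
    have hlen2 : min i t.length = min i (t.length - i) := by
      have := congrArg List.length heq2
      simpa using this
    have h2i : 2 * i ≤ t.length := by omega
    apply pvLe_pvLcp
    · omega
    · simp only [List.length_drop]; omega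
    · intro k hk
      have h3 := congrArg (fun l => l[k]?) heq2
      simp only [List.getElem?_take, hk, if_true] at h3
      exact h3
  · intro hle
    have h2i : i ≤ t.length - i := by
      have h5 := pvLcp_le_right t (t.drop i)
      have h4 : (List.drop i t).length = t.length - i := List.length_drop
      simp only [pvL] at hle
      omega
    have := pvLcp_take t (t.drop i) i hle
    rw [hadd, ← this]
  

-- the half-square equality, under 2*i ≤ |t| (so all slices are full length)
theorem pvHalf_iff (t : List Char) (i : Nat) (h2 : 2 ≤ i) (hm : 2 * i ≤ t.length) :
    (t.take (i / 2) ++ t.take (i / 2) = t.take i) ↔ (i % 2 = 0 ∧ i / 2 ≤ pvL t (i / 2)) := by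
  by_cases hev : i % 2 = 0
  · have hieq : i / 2 + i / 2 = i := by omega
    have hadd : t.take i = t.take (i / 2) ++ (t.drop (i / 2)).take (i / 2) := by
      conv_lhs => rw [← hieq]
      rw [List.take_add]
    constructor
    · intro heq
      rw [hadd] at heq
      have heq2 : t.take (i / 2) = (t.drop (i / 2)).take (i / 2) := List.append_cancel_left heq
      refine ⟨hev, pvLe_pvLcp _ _ _ (by omega) (by simp only [List.length_drop]; omega) ?_⟩
      intro k hk
      have h3 := congrArg (fun l => l[k]?) heq2
      simp only [List.getElem?_take, hk, if_true] at h3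
      exact h3
    · rintro ⟨-, hle⟩
      rw [hadd]
      exact congrArg (t.take (i / 2) ++ ·) (pvLcp_take t (t.drop (i / 2)) (i / 2) hle)
  · constructor
    · intro heq
      have := congrArg List.length heq
      simp only [List.length_append, List.length_take] at this
      omega
    · rintro ⟨h, -⟩; exact absurd h hev

-- reference predicate both inner conditions reduce to
def pvP (t : List Char) (i : Nat) : Bool :=
  decide (i ≤ pvL t i) && !(decide (i % 2 = 0) && decide (i / 2 ≤ pvL t (i / 2)))

theorem pvP_le (t : List Char) (i : Nat) (h1 : 1 ≤ i) (h : pvP t i = true) : 2 * i ≤ t.length := by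
  have hle : i ≤ pvL t i := by
    by_contra hc
    simp [pvP, hc] at h
  have h5 := pvLcp_le_right t (t.drop i)
  have h4 : (List.drop i t).length = t.length - i := List.length_drop
  simp only [pvL] at hle
  omega

theorem pvTruncdiv_two (i : Nat) : PySem.Int.truncdiv (i : Int) 2 = ((i / 2 : Nat) : Int) := by
  simp [PySem.Int.truncdiv, Int.tdiv]

theorem pvACond_eq (t : List Char) (i : Nat) (h2 : 2 ≤ i) : pvACond t (i : Int) = pvP t i := by
  have e1 : PySem.List.slice t none (some (i : Int)) = t.take i := PySem.List.slice_to_natCast t i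
  have e2 : PySem.List.slice t none (some (2 * (i : Int))) = t.take (2 * i) := by
    have : (2 * (i : Int)) = ((2 * i : Nat) : Int) := by push_cast; ring
    rw [this, PySem.List.slice_to_natCast]
  have e3 : PySem.List.slice t none (some (PySem.Int.truncdiv (i : Int) 2)) = t.take (i / 2) := by
    rw [pvTruncdiv_two, PySem.List.slice_to_natCast]
  rcases Nat.eq_zero_or_pos t.length with h0 | hlen
  · have ht : t = [] := List.eq_nil_of_length_eq_zero h0
    subst ht
    have hnle : ¬ (i ≤ pvL [] i) := by simp [pvL, pvLcp]; omega
    simp [pvACond, pvP, e1, e2, e3, hnle]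
  · simp only [pvACond, e1, e2, e3]
    by_cases h1 : i ≤ pvL t i
    · have hsq : t.take i ++ t.take i = t.take (2 * i) := (pvSq_iff t i (by omega) hlen).mpr h1
      have h2i : 2 * i ≤ t.length := by
        have h5 := pvLcp_le_right t (t.drop i)
        have h4 : (List.drop i t).length = t.length - i := List.length_drop
        simp only [pvL] at h1
        omega
      have hh := pvHalf_iff t i h2 h2i
      unfold pvP
      rw [decide_eq_true hsq, decide_eq_true h1, (decide_eq_decide).mpr hh, Bool.decide_and]
    · have hnsq : ¬ (t.take i ++ t.take i = t.take (2 * i)) := fun h => h1 ((pvSq_iff t i (by omega) hlen).mp h)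
      unfold pvP
      rw [decide_eq_false hnsq, decide_eq_false h1]
      simp

-- reference scan: i = a, a-1, …, 2
def pvFind : List Char → Nat → Option (List Char)
  | _, 0 => none
  | _, 1 => none
  | t, (a + 2) => if pvP t (a + 2) then some (t.take (a + 2)) else pvFind t (a + 1)

theorem pyRange_down_eq (a : Int) :
    PySem.List.pyRange a 1 (-1) = (List.range (a - 1).toNat).map (fun k : Nat => a - (k : Int)) := by
  by_cases h : (1 : Int) < a
  · simp only [PySem.List.pyRange, if_neg (by norm_num : ¬ ((-1 : Int) = 0)),
      if_neg (by norm_num : ¬ ((0 : Int) < -1)), if_pos h]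
    have hc : (a - 1 + - -1 - 1) / -(-1) = a - 1 := by
      norm_num
    rw [hc]
    apply List.map_congr_left
    intro k _
    ring
  · have h0 : (a - 1).toNat = 0 := by omega
    rw [h0]
    simp only [PySem.List.pyRange, if_neg (by norm_num : ¬ ((-1 : Int) = 0)),
      if_neg (by norm_num : ¬ ((0 : Int) < -1)), if_neg (by omega : ¬ ((1 : Int) < a))]
    simp

theorem pyRange_down_nil (a : Int) (h : a ≤ 1) : PySem.List.pyRange a 1 (-1) = [] := by
  rw [pyRange_down_eq]
  have h0 : (a - 1).toNat = 0 := by omega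
  rw [h0]
  simp

theorem pyRange_down_cons (a : Int) (h : 1 < a) :
    PySem.List.pyRange a 1 (-1) = a :: PySem.List.pyRange (a - 1) 1 (-1) := by
  rw [pyRange_down_eq, pyRange_down_eq]
  have h0 : (a - 1).toNat = (a - 1 - 1).toNat + 1 := by omega
  rw [h0, List.range_succ_eq_map, List.map_cons, List.map_map]
  congr 1
  · simp
  · apply List.map_congr_left
    intro k _
    simp only [Function.comp_apply]
    push_cast
    ring

theorem pvAInner_eq_find (t : List Char) (a : Nat) :
    pvAInner t (PySem.List.pyRange (a : Int) 1 (-1)) = pvFind t a := by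
  induction a using Nat.strong_induction_on with
  | _ a ih =>
    match a with
    | 0 => rw [pyRange_down_nil _ (by norm_num)]; rfl
    | 1 => rw [pyRange_down_nil _ (by norm_num)]; rfl
    | (k + 2) =>
      rw [pyRange_down_cons _ (by push_cast; omega)]
      have hcast : ((k + 2 : Nat) : Int) - 1 = ((k + 1 : Nat) : Int) := by push_cast; ring
      rw [hcast]
      simp only [pvAInner]
      rw [pvACond_eq t (k + 2) (by omega), PySem.List.slice_to_natCast]
      by_cases hp : pvP t (k + 2) = true
      · simp [pvFind, hp]
      · simp only [Bool.not_eq_true] at hp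
        simp [pvFind, hp]
        exact_mod_cast ih (k + 1) (by omega)

theorem pvP_false_high (t : List Char) (i : Nat) (h : t.length / 2 < i) : pvP t i = false := by
  by_cases hp : pvP t i = true
  · have := pvP_le t i (by omega) hp
    omega
  · simpa using hp

theorem pvFind_high (t : List Char) (a : Nat) (h : t.length / 2 ≤ a) :
    pvFind t a = pvFind t (t.length / 2) := by
  induction a using Nat.strong_induction_on with
  | _ a ih =>
    rcases Nat.lt_or_ge (t.length / 2) a with hgt | hle2
    · match a, hgt with
      | 1, hgt =>
        have h0 : t.length / 2 = 0 := by omega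
        rw [h0]; rfl
      | (k + 2), hgt =>
        show pvFind t (k + 2) = _
        simp only [pvFind, pvP_false_high t (k + 2) hgt]
        simpa using ih (k + 1) (by omega) (by omega)
    · have : a = t.length / 2 := by omega
      rw [this]

theorem pvBCond_eq (t : List Char) (z : List Nat)
    (hz : ∀ q, 1 ≤ q → q ≤ min 2500 (t.length / 2) → z.getD q 0 = pvL t q)
    (i : Nat) (h2 : 2 ≤ i) (hi : i ≤ t.length / 2) (hi25 : i ≤ 2500) : pvBCond z i = pvP t i := by
  unfold pvBCond pvP
  rw [hz i (by omega) (by omega), hz (i / 2) (by omega) (by omega)]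

theorem pvBInner_eq_find (t : List Char) (z : List Nat)
    (hz : ∀ q, 1 ≤ q → q ≤ min 2500 (t.length / 2) → z.getD q 0 = pvL t q)
    (a : Nat) (ha : a ≤ t.length / 2) (ha25 : a ≤ 2500) :
    pvBInner t z (PySem.List.pyRange (a : Int) 1 (-1)) = pvFind t a := by
  induction a using Nat.strong_induction_on with
  | _ a ih =>
    match a, ha, ha25 with
    | 0, ha, ha25 => rw [pyRange_down_nil _ (by norm_num)]; rfl
    | 1, ha, ha25 => rw [pyRange_down_nil _ (by norm_num)]; rfl
    | (k + 2), ha, ha25 =>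
      rw [pyRange_down_cons _ (by push_cast; omega)]
      have hcast : ((k + 2 : Nat) : Int) - 1 = ((k + 1 : Nat) : Int) := by push_cast; ring
      rw [hcast]
      simp only [pvBInner, Int.toNat_natCast]
      rw [pvBCond_eq t z hz (k + 2) (by omega) ha ha25]
      by_cases hp : pvP t (k + 2) = true
      · simp [pvFind, hp]
      · simp only [Bool.not_eq_true] at hp
        simp [pvFind, hp]
        exact_mod_cast ih (k + 1) (by omega) (by omega) (by omega)

-- ===== Z-array correctness =====

theorem pvZExtend_eq (t : List Char) (i k : Nat) (hi : 1 ≤ i) (h : k ≤ pvL t i) :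
    pvZExtend t i k = pvL t i := by
  have hdl : (List.drop i t).length = t.length - i := List.length_drop
  have base : ∀ k, k = pvL t i → pvZExtend t i k = pvL t i := by
    intro k hk2
    have hk2' : k = pvLcp t (t.drop i) := by simpa [pvL] using hk2
    rw [pvZExtend]
    split
    · rename_i hcond
      exfalso
      have hmax := pvLcp_max t (t.drop i) (by omega) (by omega)
      rw [List.getElem?_drop, ← hk2'] at hmax
      exact hmax hcond.2
    · exact hk2
  have main : ∀ d k, pvL t i - k ≤ d → k ≤ pvL t i → pvZExtend t i k = pvL t i := by
    intro d
    induction d with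
    | zero => intro k hd hk; exact base k (by omega)
    | succ d ihd =>
      intro k hd hk
      rcases Nat.lt_or_ge k (pvL t i) with hlt | hge
      · have hlt' : k < pvLcp t (t.drop i) := by simpa [pvL] using hlt
        rw [pvZExtend]
        split
        · exact ihd (k + 1) (by omega) (by omega)
        · rename_i hcond
          exfalso
          apply hcond
          have hr := pvLcp_le_right t (t.drop i)
          refine ⟨by omega, ?_⟩
          have hch := pvLcp_getElem? t (t.drop i) k hlt'
          rw [List.getElem?_drop] at hch
          exact hch
      · exact base k (by omega)
  exact main (pvL t i - k) k (le_refl _) h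

theorem pvSeed_le (t : List Char) (l i r : Nat) (hl : l < i) (hir : i < r) (hrm : r ≤ t.length)
    (hw : r - l ≤ pvL t l) : min (r - i) (pvL t (i - l)) ≤ pvL t i := by
  simp only [pvL] at hw ⊢
  have hs1 : min (r - i) (pvLcp t (t.drop (i - l))) ≤ r - i := Nat.min_le_left _ _
  have hs2 : min (r - i) (pvLcp t (t.drop (i - l))) ≤ pvLcp t (t.drop (i - l)) := Nat.min_le_right _ _
  have hdl : (List.drop i t).length = t.length - i := List.length_drop
  apply pvLe_pvLcp
  · omega
  · omega
  · intro k hk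
    have e1 := pvLcp_getElem? t (t.drop (i - l)) k (by omega)
    rw [List.getElem?_drop] at e1
    have e2 := pvLcp_getElem? t (t.drop l) ((i - l) + k) (by omega)
    rw [List.getElem?_drop] at e2
    have e3 : l + ((i - l) + k) = i + k := by omega
    rw [e3] at e2
    rw [List.getElem?_drop, e1]
    rw [← e2, ← e1]

-- loop invariant
def pvZInv (t : List Char) (i0 : Nat) (z : List Nat) (l r : Nat) : Prop :=
  z.length = t.length ∧ l < i0 ∧ l ≤ r ∧ r ≤ t.length ∧ r - l ≤ pvL t l ∧ (r = 0 ∨ 1 ≤ l) ∧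
  (∀ q, 1 ≤ q → q < i0 → z.getD q 0 = pvL t q) ∧
  (∀ q, i0 ≤ q → z.getD q 0 = 0)

theorem pvGetD_set_self (z : List Nat) (i v : Nat) (h : i < z.length) :
    (z.set i v).getD i 0 = v := by
  rw [List.getD_eq_getElem?_getD, List.getElem?_set_self h]
  rfl

theorem pvGetD_set_ne (z : List Nat) (i v q : Nat) (h : i ≠ q) :
    (z.set i v).getD q 0 = z.getD q 0 := by
  rw [List.getD_eq_getElem?_getD, List.getElem?_set_ne h, ← List.getD_eq_getElem?_getD]

theorem pvZLoop_correct (t : List Char) (e : Nat) (he : e ≤ t.length) :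
    ∀ (fuel i0 : Nat) (z : List Nat) (l r : Nat),
    e - i0 ≤ fuel → 1 ≤ i0 → pvZInv t i0 z l r →
    ∀ q, 1 ≤ q → q < e →
      (pvZLoop t z l r (PySem.List.pyRange (i0 : Int) (e : Int) 1)).getD q 0 = pvL t q := by
  intro fuel
  induction fuel with
  | zero =>
    intro i0 z l r hf h1 hinv q hq1 hq2
    rw [PySem.List.pyRange_one_eq_nil (by exact_mod_cast (by omega : e ≤ i0))]
    exact hinv.2.2.2.2.2.2.1 q hq1 (by omega)
  | succ fuel ih =>
    intro i0 z l r hf h1 hinv q hq1 hq2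
    obtain ⟨hzlen, hli, hlr, hrm, hw, hl01, hdone, htodo⟩ := hinv
    rcases Nat.lt_or_ge i0 e with hlt' | hge
    · have hlt : i0 < t.length := by omega
      rw [PySem.List.pyRange_one_cons (by exact_mod_cast hlt'),
        (by push_cast; ring : ((i0 : Int) + 1) = ((i0 + 1 : Nat) : Int))]
      simp only [pvZLoop, Int.toNat_natCast]
      have hseed :
          (if i0 < r then z.set i0 (min (r - i0) (z.getD (i0 - l) 0)) else z).getD i0 0 ≤ pvL t i0 := by
        by_cases hir : i0 < r
        · rw [if_pos hir, hdone (i0 - l) (by omega) (by omega),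
            pvGetD_set_self z i0 _ (by omega)]
          exact pvSeed_le t l i0 r hli hir hrm hw
        · rw [if_neg hir, htodo i0 (le_refl _)]
          exact Nat.zero_le _
      rw [pvZExtend_eq t i0 _ h1 hseed]
      have hvle : pvL t i0 ≤ t.length - i0 := by
        have := pvLcp_le_right t (t.drop i0)
        have hdl : (List.drop i0 t).length = t.length - i0 := List.length_drop
        simp only [pvL]
        omega
      -- facts about z2 := (z1).set i0 (pvL t i0), uniform in the seed branch
      have hz1len : (if i0 < r then z.set i0 (min (r - i0) (z.getD (i0 - l) 0)) else z).length = t.length := by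
        by_cases hir : i0 < r <;> simp [hir, hzlen]
      have hz1ne : ∀ q, q ≠ i0 →
          (if i0 < r then z.set i0 (min (r - i0) (z.getD (i0 - l) 0)) else z).getD q 0 = z.getD q 0 := by
        intro q hq
        by_cases hir : i0 < r
        · rw [if_pos hir, pvGetD_set_ne _ _ _ _ (fun h => hq h.symm)]
        · rw [if_neg hir]
      have hinv' : ∀ l' r', l' < i0 + 1 → l' ≤ r' → r' ≤ t.length → r' - l' ≤ pvL t l' →
          (r' = 0 ∨ 1 ≤ l') →
          pvZInv t (i0 + 1)
            ((if i0 < r then z.set i0 (min (r - i0) (z.getD (i0 - l) 0)) else z).set i0 (pvL t i0)) l' r' := by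
        intro l' r' a1 a2 a3 a4 a5
        refine ⟨by rw [List.length_set]; exact hz1len, a1, a2, a3, a4, a5, ?_, ?_⟩
        · intro q hq1' hq2'
          rcases Nat.lt_or_ge q i0 with hqi | hqi
          · rw [pvGetD_set_ne _ _ _ _ (by omega), hz1ne q (by omega)]
            exact hdone q hq1' hqi
          · have hqe : q = i0 := by omega
            subst hqe
            exact pvGetD_set_self _ _ _ (by omega)
        · intro q hq'
          rw [pvGetD_set_ne _ _ _ _ (by omega), hz1ne q (by omega)]
          exact htodo q (by omega)
      by_cases hbr : r < i0 + pvL t i0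
      · rw [if_pos hbr]
        exact ih (i0 + 1) _ i0 (i0 + pvL t i0) (by omega) (by omega)
          (hinv' i0 (i0 + pvL t i0) (by omega) (by omega) (by omega) (by omega) (Or.inr h1))
          q hq1 hq2
      · rw [if_neg hbr]
        exact ih (i0 + 1) _ l r (by omega) (by omega)
          (hinv' l r (by omega) hlr hrm hw hl01) q hq1 hq2
    · rw [PySem.List.pyRange_one_eq_nil (by exact_mod_cast hge)]
      exact hdone q hq1 (by omega)

theorem pvZArray_correct (t : List Char) (hi : Nat) :
    ∀ q, 1 ≤ q → q < min t.length hi → (pvZArray t hi).getD q 0 = pvL t q := by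
  intro q hq1 hq2
  unfold pvZArray
  apply pvZLoop_correct t (min t.length hi) (by omega) (min t.length hi) 1 _ 0 0 (by omega)
    (by omega) _ q hq1 hq2
  refine ⟨by simp, by omega, le_refl _, Nat.zero_le _, by omega, Or.inl rfl, ?_, ?_⟩
  · intro q h1 h2; omega
  · intro q _
    rw [List.getD_eq_getElem?_getD, List.getElem?_replicate]
    split <;> rfl

-- ===== assembling the equivalence =====

theorem pvInner_eq (t : List Char) :
    pvAInner t (PySem.List.pyRange 2500 1 (-1)) =
      pvBInner t (pvZArray t (min 2500 (t.length / 2) + 1))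
        (PySem.List.pyRange ((min 2500 (t.length / 2) : Nat) : Int) 1 (-1)) := by
  have hz : ∀ q, 1 ≤ q → q ≤ min 2500 (t.length / 2) →
      (pvZArray t (min 2500 (t.length / 2) + 1)).getD q 0 = pvL t q := by
    intro q hq1 hq2
    exact pvZArray_correct t _ q hq1 (by omega)
  have e25 : (2500 : Int) = ((2500 : Nat) : Int) := by norm_num
  rw [e25, pvAInner_eq_find t 2500,
    pvBInner_eq_find t _ hz (min 2500 (t.length / 2)) (Nat.min_le_right _ _) (Nat.min_le_left _ _)]
  by_cases hc : t.length / 2 ≤ 2500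
  · rw [(by omega : min 2500 (t.length / 2) = t.length / 2)]
    exact pvFind_high t 2500 hc
  · rw [(by omega : min 2500 (t.length / 2) = 2500)]

theorem pvOuter_eq (s : List Char) : ∀ l : List Int, (∀ j ∈ l, 0 ≤ j) →
    pvAOuter s l = pvBOuter s l := by
  intro l
  induction l with
  | nil => intro _; rfl
  | cons j rest ih =>
    intro hmem
    have h0j : 0 ≤ j := hmem j List.mem_cons_self
    simp only [pvAOuter, pvBOuter]
    rw [PySem.List.slice_from s h0j]
    have em : s.length - j.toNat = (s.drop j.toNat).length := List.length_drop.symm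
    rw [em, pvInner_eq (s.drop j.toNat)]
    cases h : pvBInner (s.drop j.toNat)
        (pvZArray (s.drop j.toNat) (min 2500 ((s.drop j.toNat).length / 2) + 1))
        (PySem.List.pyRange ((min 2500 ((s.drop j.toNat).length / 2) : Nat) : Int) 1 (-1)) with
    | some r => rfl
    | none => exact ih (fun x hx => hmem x (List.mem_cons_of_mem _ hx))

theorem pvDrop_pred (s : List Char) (hs : s ≠ []) :
    ∃ c, s.getLast? = some c ∧ s.drop (s.length - 1) = [c] := by
  induction s with
  | nil => exact absurd rfl hs
  | cons x tl ih =>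
    cases tl with
    | nil => exact ⟨x, rfl, rfl⟩
    | cons y tl2 =>
      obtain ⟨c, h1, h2⟩ := ih (by simp)
      refine ⟨c, by rw [List.getLast?_cons_cons]; exact h1, ?_⟩
      have hlen : (x :: y :: tl2).length - 1 = (y :: tl2).length - 1 + 1 := by
        simp
      rw [hlen, List.drop_succ_cons]
      exact h2

theorem pvFallback_eq (string : String) (hs : string.toList ≠ []) :
    (if 1 < (PySem.List.slice string.toList (some ((string.toList.length : Int) - 1)) none).length then
       String.ofList (pvOneTerm (PySem.List.slice string.toList (some ((string.toList.length : Int) - 1)) none))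
     else if decide (1 < string.toList.length)
          && decide ((PySem.List.pyGet? string.toList (-2)).map (fun c => [c]) =
               some (PySem.List.slice string.toList (some ((string.toList.length : Int) - 1)) none)) then
       String.ofList (pvOneTerm string.toList)
     else string)
    = (if decide (1 < string.toList.length)
          && decide (PySem.List.pyGet? string.toList (-2) = PySem.List.pyGet? string.toList (-1)) then
         match PySem.List.pyGet? string.toList (-1) with
         | some c => if string.toList = List.replicate string.toList.length c then String.ofList [c] else string
         | none => string
       else string) := by
  have hn1 : 1 ≤ string.toList.length := List.length_pos_of_ne_nil hs
  obtain ⟨c, hlast, hdrop⟩ := pvDrop_pred string.toList hs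
  have hcast : ((string.toList.length : Int) - 1) = ((string.toList.length - 1 : Nat) : Int) := by
    omega
  rw [hcast, PySem.List.slice_from_natCast, hdrop, PySem.List.pyGet?_neg_one, hlast,
    if_neg (by simp)]
  by_cases hn : 1 < string.toList.length
  · have h2 := PySem.List.pyGet?_neg_ofNat string.toList 2 (by norm_num) (by omega)
    obtain ⟨c2, hc2⟩ : ∃ c2, string.toList[string.toList.length - 2]? = some c2 :=
      ⟨_, List.getElem?_eq_getElem (by omega)⟩
    rw [h2, hc2]
    have d1 : decide (1 < string.toList.length) = true := decide_eq_true hn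
    by_cases hcc : c2 = c
    · subst hcc
      simp only [Option.map_some, d1, Bool.true_and]
      simp only [pvOneTerm, PySem.List.pyGet?_neg_one, hlast]
      split_ifs <;> simp [String.ofList_toList]
    · have e1 : decide ((some c2).map (fun c => [c]) = some [c]) = false := by
        simp [hcc]
      have e2 : decide (some c2 = some c) = false := by simp [hcc]
      rw [e1, e2]
      simp
  · have d1 : decide (1 < string.toList.length) = false := decide_eq_false hn
    rw [d1]
    simp

-- ===== VERDICT (by name: the statement is the Claim_ definition above) =====
theorem repeating_sequence_py_spec : Claim_equal_repeating_sequence_py := by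
  unfold Claim_equal_repeating_sequence_py
  intro string hdom hpre
  unfold Spec_repeating_sequence_py
  have hs : string.toList ≠ [] := by
    intro h
    apply hpre
    rw [← (String.ofList_toList : String.ofList string.toList = string), h]
  have houter := pvOuter_eq string.toList (PySem.List.pyRange 0 string.toList.length 1)
    (fun j hj => ((PySem.List.mem_pyRange_one).mp hj).1)
  cases hm : pvBOuter string.toList (PySem.List.pyRange 0 string.toList.length 1) with
  | some r =>
    simp only [repeating_sequence_py, repeating_sequence_py_alt, houter, hm]
  | none =>
    simp only [repeating_sequence_py, repeating_sequence_py_alt, houter, hm]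
    exact pvFallback_eq string hs
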